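-- pv_equiv track=rewrite | github.com/TsunomakiUnieles/Projet-AP2-2021 | Slitherlink.py | convert_indice
-- ===== SOURCE A (Python) =====
-- def convert_indice(chaine):
--     """Fonction permet de créer une liste de listes avec la grille de la
--     chaine pour avoir un tableau d'indices.
--     :param: str
--     :return: list
--
--     >>> convert_indice("3_0__\n230__\n10_3_\n")
--     [[3, None, 0, None, None], [2, 3, 0, None, None], [1, 0, None, 3, None]]
--     >>> convert_indice("3_0__\n230__\n10_3_\n_____\n")
--     [[3, None, 0, None, None], [2, 3, 0, None, None], [1, 0, None, 3, None], [None, None, None, None, None]]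
--     >>> convert_indice("11\n21\n")
--     [[1, 1], [2, 1]]
--     """
--
--     indice = []
--     line = []
--     for i in range(len(chaine)):
--         if chaine[i] == "_":
--             line.append(None)
--         elif (
--             chaine[i] == "1" or
--             chaine[i] == "2" or
--             chaine[i] == "3" or
--             chaine[i] == "0"
--         ):
--             line.append(int(chaine[i]))
--         elif chaine[i] == "\n":
--             indice.append(line)
--             line = []
--     return indice
-- ===== SOURCE B (Python) =====
-- def convert_indice(chaine):
--     indice = []
--     for ligne in chaine.split("\n")[:-1]:
--         row = []
--         for c in ligne:
--             if c == "_":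
--                 row.append(None)
--             elif c in "0123":
--                 row.append(int(c))
--         indice.append(row)
--     return indice
-- ===== Notes on version B (the rewrite author's own statement) =====
-- stated objective: simpler
-- what changed: Replaces A's flat character scan with inline newline flushing and leftover loop state by a pre-split on newlines (dropping the unterminated tail) followed by a per-line row builder; the per-character indexing loop disappears.
import Mathlib
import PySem

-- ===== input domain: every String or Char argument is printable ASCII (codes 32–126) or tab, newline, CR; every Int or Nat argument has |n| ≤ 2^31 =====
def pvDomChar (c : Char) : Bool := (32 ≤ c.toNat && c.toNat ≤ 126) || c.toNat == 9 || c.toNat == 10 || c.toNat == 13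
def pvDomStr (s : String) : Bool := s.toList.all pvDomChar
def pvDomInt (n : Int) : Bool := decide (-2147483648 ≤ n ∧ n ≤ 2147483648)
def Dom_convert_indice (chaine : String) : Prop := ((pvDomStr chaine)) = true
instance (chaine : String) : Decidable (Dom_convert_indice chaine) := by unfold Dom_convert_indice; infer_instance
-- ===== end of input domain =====

-- B replaces A's flat character scan (flushing a row buffer at each newline) by a pre-split
-- of the string on newlines, dropping the unterminated tail, then building each row per line.


-- ===== PORT A =====
-- A's loop body: '_' appends None, '1'/'2'/'3'/'0' appends int(chaine[i])
-- (int of a single digit char = its code minus 48, exact here), '\n' flushes the row.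
def stepA (st : List (List (Option Int)) × List (Option Int)) (c : Char) :
    List (List (Option Int)) × List (Option Int) :=
  if c = '_' then (st.1, st.2 ++ [none])
  else if c = '1' ∨ c = '2' ∨ c = '3' ∨ c = '0' then (st.1, st.2 ++ [some ((c.toNat : Int) - 48)])
  else if c = '\n' then (st.1 ++ [st.2], [])
  else st

-- 'for i in range(len(chaine)): … chaine[i] …' as a fold over range with pyGetD.
def convert_indice (chaine : String) : List (List (Option Int)) :=
  ((PySem.List.pyRange 0 (PySem.Str.len chaine) 1).foldl
    (fun st i => stepA st (PySem.List.pyGetD chaine.toList i ' '))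
    (([], []) : List (List (Option Int)) × List (Option Int))).1

-- ===== PORT B =====
-- B's inner loop: build one row from one line ('\n'-free by construction of the split).
def stepB (row : List (Option Int)) (c : Char) : List (Option Int) :=
  if c = '_' then row ++ [none]
  else if ['0', '1', '2', '3'].contains c then row ++ [some ((c.toNat : Int) - 48)]
  else row

def rowOf (line : List Char) : List (Option Int) :=
  line.foldl stepB []

-- chaine.split("\n")[:-1], then one row appended per line.
def convert_indice_alt (chaine : String) : List (List (Option Int)) :=
  ((PySem.Chars.splitOn chaine.toList ['\n']).dropLast).foldl
    (fun acc line => acc ++ [rowOf line]) []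

-- ===== PRECONDITION & SPEC =====
def Spec_convert_indice (chaine : String) (out : List (List (Option Int))) : Prop := out = convert_indice_alt chaine
instance (chaine : String) (out : List (List (Option Int))) : Decidable (Spec_convert_indice chaine out) := by unfold Spec_convert_indice; infer_instance

-- ===== CLAIM (what is proved, stated in full; the proofs are below) =====
def Claim_equal_convert_indice : Prop := ∀ (chaine : String), Dom_convert_indice chaine → Spec_convert_indice chaine (convert_indice chaine)

-- ===== LEMMAS AND PROOFS =====

-- A clean structural recursion computing split-on-'\n'; bridged to PySem.Chars.splitOn below.
def nsplit : List Char → List (List Char)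
  | [] => [[]]
  | c :: cs => if c = '\n' then [] :: nsplit cs else ((nsplit cs).headI.cons c) :: (nsplit cs).tail

theorem nsplit_ne_nil (l : List Char) : nsplit l ≠ [] := by
  cases l with
  | nil => simp [nsplit]
  | cons c cs => simp only [nsplit]; split <;> simp

theorem headI_cons_tail {a : Type} [Inhabited a] (xs : List a) (h : xs ≠ []) : xs.headI :: xs.tail = xs := by
  cases xs with
  | nil => exact absurd rfl h
  | cons x t => rfl

theorem go_eq (l : List Char) : ∀ (fuel : Nat), l.length ≤ fuel → ∀ (cur : List Char) (acc : List (List Char)),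
    PySem.Chars.splitOn.go ['\n'] fuel l cur acc
      = acc.reverse ++ (cur.reverse ++ (nsplit l).headI) :: (nsplit l).tail := by
  induction l with
  | nil =>
    intro fuel _ cur acc
    cases fuel <;> simp [PySem.Chars.splitOn.go, nsplit]
  | cons c cs ih =>
    intro fuel hf cur acc
    cases fuel with
    | zero => simp at hf
    | succ f =>
      rw [PySem.Chars.splitOn.go]
      by_cases hc : c = '\n'
      · subst hc
        simp only [List.isPrefixOf, Bool.and_true, beq_self_eq_true, if_pos, List.length_cons] at *
        simp only [List.length_nil, Nat.zero_add, List.drop_succ_cons, List.drop_zero]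
        rw [ih f (by omega)]
        simp [nsplit]
        exact headI_cons_tail _ (nsplit_ne_nil cs)
      · have hpre : List.isPrefixOf ['\n'] (c :: cs) = false := by
          simp [List.isPrefixOf]; exact fun h => absurd h.symm hc
        rw [if_neg (by simp [hpre])]
        rw [ih f (by simpa using Nat.succ_le_succ_iff.mp hf)]
        simp [nsplit, hc]

theorem splitOn_nl (l : List Char) : PySem.Chars.splitOn l ['\n'] = nsplit l := by
  rw [PySem.Chars.splitOn, go_eq l (l.length + 1) (by omega)]
  simp
  cases h : nsplit l with
  | nil => exact absurd h (nsplit_ne_nil l)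
  | cons a t => simp

-- stepB factors through its accumulator.
theorem stepB_acc (r : List (Option Int)) (c : Char) : stepB r c = r ++ stepB [] c := by
  unfold stepB; split_ifs <;> simp

theorem foldl_stepB_acc (cs : List Char) : ∀ (r : List (Option Int)),
    cs.foldl stepB r = r ++ rowOf cs := by
  induction cs with
  | nil => intro r; simp [rowOf]
  | cons c cs ih =>
    intro r
    simp only [List.foldl_cons]
    rw [ih (stepB r c), stepB_acc, List.append_assoc]
    rw [show rowOf (c :: cs) = List.foldl stepB (stepB [] c) cs from rfl, ih (stepB [] c)]

theorem rowOf_cons (c : Char) (cs : List Char) : rowOf (c :: cs) = stepB [] c ++ rowOf cs := by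
  rw [rowOf, List.foldl_cons, foldl_stepB_acc]

-- Main invariant: A's scan with pending state (acc, row) produces the already-flushed rows
-- followed by one row per completed part of the remaining input, the first part continuing row.
theorem scan_eq (l : List Char) : ∀ (acc : List (List (Option Int))) (row : List (Option Int)),
    (l.foldl stepA (acc, row)).1
      = acc ++ (((nsplit l).dropLast.map rowOf).modifyHead (fun x => row ++ x)) := by
  induction l with
  | nil => intro acc row; simp [nsplit]
  | cons c cs ih =>
    intro acc row
    simp only [List.foldl_cons]
    by_cases hnl : c = '\n'
    · subst hnl
      have : stepA (acc, row) '\n' = (acc ++ [row], []) := by simp [stepA]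
      rw [this, ih]
      have hd : (nsplit ('\n' :: cs)).dropLast = [] :: (nsplit cs).dropLast := by
        simp only [nsplit, if_pos]
        cases h : nsplit cs with
        | nil => exact absurd h (nsplit_ne_nil cs)
        | cons a t => simp
      rw [hd]
      cases hm : List.map rowOf (nsplit cs).dropLast with
      | nil => simp [rowOf, hm]
      | cons a t => simp [rowOf, hm]
    · have hsplit : nsplit (c :: cs) = ((nsplit cs).headI.cons c) :: (nsplit cs).tail := by
        simp [nsplit, hnl]
      have hA : stepA (acc, row) c = (acc, row ++ stepB [] c) := by
        unfold stepA stepB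
        split_ifs with h1 h2 h3 h4 <;> simp_all
      rw [hA, ih, hsplit]
      obtain ⟨h, t, hht⟩ : ∃ h t, nsplit cs = h :: t := by
        cases hcs : nsplit cs with
        | nil => exact absurd hcs (nsplit_ne_nil cs)
        | cons a t => exact ⟨a, t, rfl⟩
      rw [hht]
      cases t with
      | nil => simp
      | cons b u =>
        simp only [List.headI, List.tail, List.dropLast, List.map, List.modifyHead, rowOf_cons]
        simp [List.append_assoc]

-- ===== VERDICT (by name: the statement is the Claim_ definition above) =====
theorem convert_indice_spec : Claim_equal_convert_indice := by
  intro chaine _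
  unfold Spec_convert_indice convert_indice convert_indice_alt
  rw [show PySem.Str.len chaine = (chaine.toList.length : Int) from by simp,
    PySem.List.foldl_pyRange_zero_pyGetD' chaine.toList ' ' stepA (([], []) : List (List (Option Int)) × List (Option Int))]
  rw [scan_eq, splitOn_nl, PySem.List.foldl_append_singleton_eq_map]
  cases h : (nsplit chaine.toList).dropLast.map rowOf with
  | nil => simp
  | cons a t => simp
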